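-- pv_equiv track=rewrite | github.com/woshinidad88/BioFlow-CLI | bioflow/bio_tasks.py | _detect_sequence_format
-- ===== SOURCE A (Python) =====
-- def _detect_sequence_format(text: str) -> str | None:
--     """根据首个非空行识别序列格式。"""
--     for line in text.splitlines():
--         line = line.strip()
--         if not line:
--             continue
--         if line.startswith(">"):
--             return "fasta"
--         if line.startswith("@"):
--             return "fastq"
--         return None
--     return None
-- ===== SOURCE B (Python) =====
-- def _detect_sequence_format(text: str) -> str | None:
--     """根据首个非空行识别序列格式。"""
--     s = text.strip()
--     if not s:
--         return None
--     c = s[0]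
--     if c == ">":
--         return "fasta"
--     if c == "@":
--         return "fastq"
--     return None
-- ===== Notes on version B (the rewrite author's own statement) =====
-- stated objective: simpler
-- what changed: Replaces the per-line loop with skip-empty branch by a single strip of the whole text followed by one first-character test, relying on line breaks being whitespace so the classifying character is the first non-whitespace character of the text.
import Mathlib
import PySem

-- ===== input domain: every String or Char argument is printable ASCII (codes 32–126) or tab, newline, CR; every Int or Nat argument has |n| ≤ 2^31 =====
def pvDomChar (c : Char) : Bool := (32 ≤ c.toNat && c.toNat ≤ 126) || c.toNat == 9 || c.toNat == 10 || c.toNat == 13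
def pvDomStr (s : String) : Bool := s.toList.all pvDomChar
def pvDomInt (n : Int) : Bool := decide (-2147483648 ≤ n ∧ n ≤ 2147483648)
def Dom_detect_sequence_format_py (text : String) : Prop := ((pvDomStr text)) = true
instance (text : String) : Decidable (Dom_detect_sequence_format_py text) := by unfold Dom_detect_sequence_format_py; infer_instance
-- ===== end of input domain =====

-- B replaces A's per-line loop (skip empty lines, classify the first non-empty one) by a single strip
-- of the whole text and one first-character test (simpler decomposition; same cost).

-- ===== PORT A =====
def goA_detect : List String → Option String
  | [] => none
  | line :: rest =>
    let l := PySem.Str.strip line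
    if l = "" then goA_detect rest
    else if PySem.Str.startswith l ">" then some "fasta"
    else if PySem.Str.startswith l "@" then some "fastq"
    else none

def detect_sequence_format_py (text : String) : Option String :=
  goA_detect (PySem.Str.splitlines text)

-- ===== PORT B =====
def detect_sequence_format_py_alt (text : String) : Option String :=
  let s := PySem.Str.strip text
  if s = "" then none
  else
    match PySem.Str.pyGet? s 0 with   -- s[0]; always `some` here since s ≠ ""
    | none => none
    | some c =>
      if c = '>' then some "fasta"
      else if c = '@' then some "fastq"
      else none

-- ===== PRECONDITION & SPEC =====
def Spec_detect_sequence_format_py (text : String) (out : Option String) : Prop := out = detect_sequence_format_py_alt text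
instance (text : String) (out : Option String) : Decidable (Spec_detect_sequence_format_py text out) := by unfold Spec_detect_sequence_format_py; infer_instance

-- ===== CLAIM (what is proved, stated in full; the proofs are below) =====
def Claim_equal_detect_sequence_format_py : Prop := ∀ (text : String), Dom_detect_sequence_format_py text → Spec_detect_sequence_format_py text (detect_sequence_format_py text)

-- ===== LEMMAS AND PROOFS =====

-- the line-break predicate (same body as the `have isB` inside PySem.Chars.splitlines)
def pvIsB (c : Char) : Bool :=
  have n := c.toNat
  decide (n = 10) || decide (n = 13) || decide (n = 11) || decide (n = 12) || decide (n = 28) || decide (n = 29) ||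
          decide (n = 30) ||
        decide (n = 133) ||
      decide (n = 8232) ||
    decide (n = 8233)

-- accumulator-free mirror of PySem.Chars.splitlines.go
def glines : List Char → List Char → List (List Char)
  | [], cur => if cur.isEmpty then [] else [cur.reverse]
  | '\r' :: '\n' :: rest, cur => cur.reverse :: glines rest []
  | c :: rest, cur => if pvIsB c then cur.reverse :: glines rest [] else glines rest (c :: cur)

-- A's loop, on the Chars side
def loopC : List (List Char) → Option String
  | [] => none
  | l :: rest =>
    let s := PySem.Chars.strip l
    if s = [] then loopC rest
    else if PySem.Chars.startswith s ['>'] then some "fasta"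
    else if PySem.Chars.startswith s ['@'] then some "fastq"
    else none

-- both programs classify the first non-whitespace character of the text
def classifyC : Option Char → Option String
  | none => none
  | some c => if c = '>' then some "fasta" else if c = '@' then some "fastq" else none

theorem isspace_of_pvIsB (c : Char) (h : pvIsB c = true) : PySem.Chars.isspace c = true := by
  simp [pvIsB, PySem.Chars.isspace] at *; omega

theorem head_dropWhile_false {p : Char → Bool} {l : List Char} {c : Char} {cs : List Char}
    (h : l.dropWhile p = c :: cs) : p c = false := by
  induction l with
  | nil => simp at h
  | cons a l ih =>
    by_cases hp : p a
    · exact ih (by simpa [List.dropWhile, hp] using h)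
    · simp [List.dropWhile, hp] at h
      simpa [h.1] using hp

theorem rstrip_decomp (x : List Char) :
    ∃ t, x = PySem.Chars.rstrip x ++ t ∧ ∀ c ∈ t, PySem.Chars.isspace c = true := by
  refine ⟨(x.reverse.takeWhile PySem.Chars.isspace).reverse, ?_, ?_⟩
  · have h := List.takeWhile_append_dropWhile (p := PySem.Chars.isspace) (l := x.reverse)
    simp [PySem.Chars.rstrip, ← List.reverse_append, h]
  · intro c hc
    exact List.mem_takeWhile_imp (by simpa using hc)

theorem head?_strip (l : List Char) :
    (PySem.Chars.strip l).head? = (l.dropWhile PySem.Chars.isspace).head? := by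
  obtain ⟨t, ht, hsp⟩ := rstrip_decomp (l.dropWhile PySem.Chars.isspace)
  have hs : PySem.Chars.strip l = PySem.Chars.rstrip (l.dropWhile PySem.Chars.isspace) := by
    simp [PySem.Chars.strip, PySem.Chars.lstrip]
  rw [hs]
  cases hr : PySem.Chars.rstrip (l.dropWhile PySem.Chars.isspace) with
  | nil =>
    rw [hr] at ht; simp at ht
    cases hw : l.dropWhile PySem.Chars.isspace with
    | nil => simp
    | cons c cs =>
      have hns := head_dropWhile_false hw
      have hc : c ∈ t := by rw [← ht, hw]; simp
      rw [hsp c hc] at hns; cases hns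
  | cons d ds =>
    rw [hr] at ht; rw [ht]; simp

theorem strip_eq_nil_iff (l : List Char) :
    PySem.Chars.strip l = [] ↔ l.dropWhile PySem.Chars.isspace = [] := by
  constructor
  · intro h
    have h2 := head?_strip l
    rw [h] at h2
    exact List.head?_eq_none_iff.mp h2.symm
  · intro h
    simp [PySem.Chars.strip, PySem.Chars.lstrip, h, PySem.Chars.rstrip]

theorem loopC_cons_nonspace {l : List Char} (rest : List (List Char))
    (h : PySem.Chars.strip l ≠ []) :
    loopC (l :: rest) = classifyC ((l.dropWhile PySem.Chars.isspace).head?) := by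
  cases hs : PySem.Chars.strip l with
  | nil => exact absurd hs h
  | cons c cs =>
    have hh : (l.dropWhile PySem.Chars.isspace).head? = some c := by
      rw [← head?_strip, hs]; rfl
    rw [hh]
    simp only [loopC, hs, classifyC]
    by_cases h1 : c = '>'
    · simp [h1, PySem.Chars.startswith, List.isPrefixOf]
    · by_cases h2 : c = '@'
      · simp [h2, PySem.Chars.startswith, List.isPrefixOf]
      · simp [h1, h2, Ne.symm h1, Ne.symm h2, PySem.Chars.startswith, List.isPrefixOf]

theorem dropWhile_all_space_append {l X : List Char}
    (h : l.dropWhile PySem.Chars.isspace = []) :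
    (l ++ X).dropWhile PySem.Chars.isspace = X.dropWhile PySem.Chars.isspace := by
  rw [List.dropWhile_append, h]; simp

theorem go_eq_glines (L cur : List Char) :
    ∀ acc, PySem.Chars.splitlines.go pvIsB L cur acc = acc.reverse ++ glines L cur := by
  induction L, cur using glines.induct with
  | case1 cur h =>
    intro acc
    rw [PySem.Chars.splitlines.go]
    simp only [glines, h, if_pos]
    simp
  | case2 cur h =>
    intro acc
    rw [PySem.Chars.splitlines.go]
    simp only [glines, h]
    simp
  | case3 rest cur ih =>
    intro acc
    rw [PySem.Chars.splitlines.go, ih]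
    simp only [glines]
    simp
  | case4 c rest cur hne hb ih =>
    intro acc
    rw [PySem.Chars.splitlines.go]
    · simp only [glines, hb, if_true, ih]
      simp
    · intro r h h2; exact hne r h h2
  | case5 c rest cur hne hb ih =>
    intro acc
    rw [PySem.Chars.splitlines.go]
    · simp only [glines, hb, ih]
      simp
    · intro r h h2; exact hne r h h2

theorem loopC_glines (L cur : List Char) :
    loopC (glines L cur) = classifyC ((cur.reverse ++ L).dropWhile PySem.Chars.isspace).head? := by
  induction L, cur using glines.induct with
  | case1 cur h =>
    have hc : cur = [] := by simpa using h
    subst hc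
    decide
  | case2 cur h =>
    simp only [glines, h, Bool.false_eq_true, if_false, List.append_nil]
    by_cases hst : PySem.Chars.strip cur.reverse = []
    · have hd := (strip_eq_nil_iff _).mp hst
      simp [loopC, hst, hd, classifyC]
    · rw [loopC_cons_nonspace [] hst]
  | case3 rest cur ih =>
    simp only [glines]
    by_cases hst : PySem.Chars.strip cur.reverse = []
    · have hd := (strip_eq_nil_iff _).mp hst
      simp only [loopC, hst, if_pos, ih]
      rw [dropWhile_all_space_append hd]
      simp only [List.reverse_nil, List.nil_append]
      congr 1
    · rw [loopC_cons_nonspace _ hst, List.dropWhile_append]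
      cases hw : cur.reverse.dropWhile PySem.Chars.isspace with
      | nil => exact absurd ((strip_eq_nil_iff _).mpr hw) hst
      | cons d ds => simp
  | case4 c rest cur hne hb ih =>
    have hsp := isspace_of_pvIsB c hb
    simp only [glines, hb, if_pos]
    by_cases hst : PySem.Chars.strip cur.reverse = []
    · have hd := (strip_eq_nil_iff _).mp hst
      simp only [loopC, hst, if_pos, ih]
      rw [dropWhile_all_space_append hd]
      simp only [List.reverse_nil, List.nil_append]
      congr 1
      rw [show (c :: rest : List Char) = [c] ++ rest from rfl,
        dropWhile_all_space_append (by simp [hsp])]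
    · rw [loopC_cons_nonspace _ hst, List.dropWhile_append]
      cases hw : cur.reverse.dropWhile PySem.Chars.isspace with
      | nil => exact absurd ((strip_eq_nil_iff _).mpr hw) hst
      | cons d ds => simp
  | case5 c rest cur hne hb ih =>
    simp only [glines, hb, Bool.false_eq_true, if_false]
    rw [ih]
    congr 2
    simp

theorem ofList_eq_empty_iff (x : List Char) : String.ofList x = "" ↔ x = [] := by
  constructor
  · intro h
    have h2 := congrArg String.toList h
    simpa using h2
  · intro h; subst h; rfl

theorem goA_eq_loopC (ls : List (List Char)) :
    goA_detect (ls.map String.ofList) = loopC ls := by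
  induction ls with
  | nil => rfl
  | cons l rest ih =>
    have hstr : PySem.Str.strip (String.ofList l) = String.ofList (PySem.Chars.strip l) := by
      simp [PySem.Str.strip]
    simp only [List.map_cons, goA_detect, loopC, hstr, ih, ofList_eq_empty_iff,
      PySem.Str.startswith]
    simp [PySem.Chars.startswith]

theorem A_char (text : String) :
    detect_sequence_format_py text = classifyC ((text.toList.dropWhile PySem.Chars.isspace).head?) := by
  have h1 : PySem.Str.splitlines text = (PySem.Chars.splitlines text.toList).map String.ofList := rfl
  have h2 : PySem.Chars.splitlines text.toList = glines text.toList [] := by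
    rw [show PySem.Chars.splitlines text.toList
        = PySem.Chars.splitlines.go pvIsB text.toList [] [] from rfl, go_eq_glines]
    simp
  rw [detect_sequence_format_py, h1, goA_eq_loopC, h2, loopC_glines]
  simp

theorem B_char (text : String) :
    detect_sequence_format_py_alt text = classifyC ((text.toList.dropWhile PySem.Chars.isspace).head?) := by
  unfold detect_sequence_format_py_alt
  have hstr : PySem.Str.strip text = String.ofList (PySem.Chars.strip text.toList) := rfl
  by_cases h : PySem.Str.strip text = ""
  · have hl : PySem.Chars.strip text.toList = [] := by
      rw [hstr] at h
      exact (ofList_eq_empty_iff _).mp h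
    rw [if_pos h, (strip_eq_nil_iff _).mp hl]
    simp [classifyC]
  · rw [if_neg h]
    cases hs : PySem.Chars.strip text.toList with
    | nil => exact absurd (by rw [hstr, hs]) h
    | cons c cs =>
      have hhead : (text.toList.dropWhile PySem.Chars.isspace).head? = some c := by
        rw [← head?_strip, hs]; rfl
      have hget : PySem.Str.pyGet? (PySem.Str.strip text) 0 = some c := by
        rw [hstr, hs]
        simp [PySem.List.pyGet?, PySem.List.pyIdx?]
      rw [hget, hhead]
      simp [classifyC]

-- ===== VERDICT (by name: the statement is the Claim_ definition above) =====
theorem detect_sequence_format_py_spec : Claim_equal_detect_sequence_format_py := by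
  intro text _
  unfold Spec_detect_sequence_format_py
  rw [A_char, B_char]
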